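-- pv_equiv track=rewrite | github.com/nikhilgoyal104/dsa | dynamic-programming/digit-dynamic-programming/template/count-binary-numbers-till-n.py | x
-- ===== SOURCE A (Python) =====
-- def x(n):
--     n = bin(n)[2:]
--     size = len(n)
--
--     def dfs(i, restrict):
--         if i == size:
--             return 1
--         count, limit = 0, int(n[i]) if restrict else 1
--         for digit in range(limit + 1):
--             count += dfs(i + 1, False if digit < limit else restrict)
--         return count
--
--     return dfs(0, True)
-- ===== SOURCE B (Python) =====
-- def x(n):
--     return n + 1
-- ===== Notes on version B (the rewrite author's own statement) =====
-- stated objective: faster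
-- what changed: Replaced the exponential digit-DP recursion over n's binary string by the closed form n + 1 (the count of integers 0..n).
import Mathlib
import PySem

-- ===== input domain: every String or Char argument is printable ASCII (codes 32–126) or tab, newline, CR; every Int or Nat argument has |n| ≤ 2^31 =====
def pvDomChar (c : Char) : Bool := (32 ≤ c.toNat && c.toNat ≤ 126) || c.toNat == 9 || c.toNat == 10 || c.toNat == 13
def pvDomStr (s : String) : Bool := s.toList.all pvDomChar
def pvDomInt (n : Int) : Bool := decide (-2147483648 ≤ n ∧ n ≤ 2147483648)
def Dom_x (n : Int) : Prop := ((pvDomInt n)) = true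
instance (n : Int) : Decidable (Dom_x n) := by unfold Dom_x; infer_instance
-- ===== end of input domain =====

-- B replaces A's exponential digit-DP recursion by the closed form n + 1 (faster, asymptotic).


-- ===== PORT A =====
-- bin(n)[2:] for n ≥ 0, as a list of '0'/'1' chars, MSB first (exact on Pre_x: n ≥ 0).
def pvBinAux : Nat → List Char
  | 0 => []
  | m + 1 => pvBinAux ((m + 1) / 2) ++ [if (m + 1) % 2 = 1 then '1' else '0']
decreasing_by exact Nat.div_lt_self (Nat.succ_pos m) (by norm_num)

def pvBin (m : Nat) : List Char := if m = 0 then ['0'] else pvBinAux m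

-- dfs(i, restrict): recursion on the remaining suffix of the digit string;
-- int(n[i]) on a '0'/'1' char is (if c = '1' then 1 else 0), exact on Pre_x.
def dfsA : List Char → Bool → Int
  | [], _ => 1
  | c :: rest, restrict =>
    let limit : Int := if restrict then (if c = '1' then 1 else 0) else 1
    (PySem.List.pyRange 0 (limit + 1) 1).foldl
      (fun count digit => count + dfsA rest (if digit < limit then false else restrict)) 0

def x (n : Int) : Int := dfsA (pvBin n.toNat) true

-- ===== PORT B =====
def x_alt (n : Int) : Int := n + 1

-- ===== PRECONDITION & SPEC =====
-- Pre_ excludes n < 0, on which A raises ValueError (bin(n)[2:] starts with 'b' there).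
def Pre_x (n : Int) : Prop := 0 ≤ n
instance (n : Int) : Decidable (Pre_x n) := by unfold Pre_x; infer_instance

def pvWitness_x : Int := 5

def Spec_x (n : Int) (out : Int) : Prop := out = x_alt n
instance (n : Int) (out : Int) : Decidable (Spec_x n out) := by unfold Spec_x; infer_instance

-- ===== CLAIM (what is proved, stated in full; the proofs are below) =====
def Claim_equal_x : Prop := ∀ (n : Int), Dom_x n → Pre_x n → Spec_x n (x n)

-- ===== LEMMAS AND PROOFS =====
-- the numeric value of a MSB-first bit string
def val2 : List Char → Int
  | [] => 0
  | c :: rest => (if c = '1' then (1 : Int) else 0) * 2 ^ rest.length + val2 rest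

theorem dfsA_false (s : List Char) : dfsA s false = 2 ^ s.length := by
  induction s with
  | nil => simp [dfsA]
  | cons c rest ih =>
    simp only [dfsA]
    norm_num [show PySem.List.pyRange 0 2 1 = [0, 1] from by decide, List.foldl, ih,
      List.length_cons]
    ring

theorem dfsA_true (s : List Char) : dfsA s true = val2 s + 1 := by
  induction s with
  | nil => simp [dfsA, val2]
  | cons c rest ih =>
    by_cases hc : c = '1'
    · simp only [dfsA, hc, if_true]
      norm_num [show PySem.List.pyRange 0 2 1 = [0, 1] from by decide, List.foldl,
        dfsA_false, ih, val2]
      ring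
    · simp only [dfsA, if_neg hc, if_true]
      norm_num [show PySem.List.pyRange 0 1 1 = [0] from by decide, List.foldl, ih,
        val2, if_neg hc]

theorem val2_append_bit (s : List Char) (c : Char) :
    val2 (s ++ [c]) = 2 * val2 s + (if c = '1' then 1 else 0) := by
  induction s with
  | nil => simp [val2]
  | cons d rest ih =>
    simp only [List.cons_append, val2, ih, List.length_append, List.length_cons,
      List.length_nil]
    ring

theorem val2_pvBinAux (m : Nat) : val2 (pvBinAux m) = m := by
  induction m using Nat.strong_induction_on with
  | _ m ih =>
    match m with
    | 0 => simp [pvBinAux, val2]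
    | k + 1 =>
      rw [pvBinAux, val2_append_bit, ih ((k + 1) / 2)
        (Nat.div_lt_self (Nat.succ_pos k) (by norm_num))]
      rcases Nat.even_or_odd (k + 1) with h | h
      · have h2 : (k + 1) % 2 = 0 := Nat.even_iff.mp h
        have key : 2 * ((k + 1) / 2) = k + 1 := by omega
        simp only [h2]
        exact_mod_cast congrArg (fun t : ℕ => (t : ℤ)) key
      · have h2 : (k + 1) % 2 = 1 := Nat.odd_iff.mp h
        have key : 2 * ((k + 1) / 2) + 1 = k + 1 := by omega
        simp only [h2]
        exact_mod_cast congrArg (fun t : ℕ => (t : ℤ)) key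

theorem val2_pvBin (m : Nat) : val2 (pvBin m) = m := by
  unfold pvBin
  split
  · simp_all [val2]
  · exact val2_pvBinAux m

-- ===== VERDICT (by name: the statement is the Claim_ definition above) =====
theorem x_spec : Claim_equal_x := by
  intro n _ hpre
  show x n = x_alt n
  rw [x, x_alt, dfsA_true, val2_pvBin, Int.toNat_of_nonneg hpre]
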